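-- pv_equiv track=rewrite | github.com/ECAP5/ECAP5-TREQ | src/ecap5_treq/parse.py | process_matching_token
-- ===== SOURCE A (Python) =====
-- def process_matching_token(cur, content, opening_token, closing_token):
--     result = ""
--     cur += 1
--     ident = 1
--     while ident > 0:
--         if content[cur] == opening_token:
--             ident += 1
--         if content[cur] == closing_token:
--             ident -= 1
--         result += content[cur]
--         cur += 1
--     result = result[:-1]
--     return (cur, result)
-- ===== SOURCE B (Python) =====
-- def process_matching_token(cur, content, opening_token, closing_token):
--     # Scan the suffix after the opening token with an explicit stack of
--     # per-nesting-level segments (newest level first) instead of A's flat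
--     # integer depth counter: closing a level merges its segment, brackets
--     # included, into the enclosing one.
--     suffix = content[cur + 1:]
--     top, stack = "", []
--     i = 0
--     while True:
--         ch = suffix[i]  # IndexError where the text is unbalanced
--         i += 1
--         if ch == closing_token:
--             if not stack:
--                 return (cur + 1 + i, top)
--             top = stack[0] + opening_token + top + closing_token
--             stack = stack[1:]
--         elif ch == opening_token:
--             stack = [top] + stack
--             top = ""
--         else:
--             top += ch
-- ===== Notes on version B (the rewrite author's own statement) =====
-- stated objective: alternative
-- what changed: Replaces A's flat while-loop over absolute indices with an integer nesting-depth counter by a scan of the suffix after the opening token that keeps an explicit stack of per-nesting-level segments, merging a finished level (brackets included) into the enclosing segment when it closes.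
-- outside the precondition, e.g. on process_matching_token(-3, '))aa', '(', ')'): A returns (1, 'aa'), B raises IndexError
import Mathlib
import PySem

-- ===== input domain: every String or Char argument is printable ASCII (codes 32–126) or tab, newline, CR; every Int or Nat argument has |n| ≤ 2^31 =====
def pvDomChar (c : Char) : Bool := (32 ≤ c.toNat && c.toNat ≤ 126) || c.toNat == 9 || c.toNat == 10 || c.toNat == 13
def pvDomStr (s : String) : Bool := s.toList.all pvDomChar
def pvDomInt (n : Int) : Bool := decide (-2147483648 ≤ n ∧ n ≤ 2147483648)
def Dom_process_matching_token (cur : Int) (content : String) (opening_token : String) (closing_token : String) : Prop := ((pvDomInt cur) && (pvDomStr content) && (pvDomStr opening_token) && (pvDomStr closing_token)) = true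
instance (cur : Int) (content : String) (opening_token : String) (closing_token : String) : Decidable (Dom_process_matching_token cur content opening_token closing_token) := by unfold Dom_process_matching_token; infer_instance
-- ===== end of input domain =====

-- B replaces A's flat integer-depth-counter scan by an explicit stack of per-nesting-level
-- segments over the suffix after the opening token (objective: alternative decomposition,
-- same O(n) cost; return value only — neither version mutates its arguments).

-- ===== PORT A =====
-- the while loop of A: state (ident, cur, result); none = IndexError (content[cur] out of range)
-- or fuel exhausted (fuel 2*len+2 is proved sufficient wherever the loop terminates: the loop
-- reads one in-range index per iteration and the at most 2*len in-range indices are consumed in order)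
def pmtLoop (L : List Char) (o c : String) : Nat → Int → Int → List Char → Option (Int × List Char)
  | 0, _, _, _ => none
  | fuel + 1, ident, cur, res =>
    if 0 < ident then
      match PySem.List.pyGet? L cur with
      | none => none
      | some ch =>
        let id1 : Int := if String.ofList [ch] == o then ident + 1 else ident
        let id2 : Int := if String.ofList [ch] == c then id1 - 1 else id1
        pmtLoop L o c fuel id2 (cur + 1) (res ++ [ch])
    else some (cur, res)

def process_matching_token (cur : Int) (content : String) (opening_token : String) (closing_token : String) : Int × String :=
  match pmtLoop content.toList opening_token closing_token (2 * content.toList.length + 2) 1 (cur + 1) [] with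
  | some (cur', res) => (cur', String.ofList res.dropLast)  -- result[:-1] (exact also on "")
  | none => (0, "")  -- unreachable under Pre_ (Python A raises IndexError there)

-- ===== PORT B =====
-- the while loop of B: state (i, top, stack); none = IndexError (suffix[i] out of range) or fuel
-- exhausted (fuel suffix.length+1 is exact: i grows by one per iteration, so the loop either
-- returns or hits an out-of-range read within suffix.length+1 iterations)
def pmtStack (suffix : List Char) (o c : String) : Nat → Nat → List Char → List (List Char) → Option (Nat × List Char)
  | 0, _, _, _ => none
  | fuel + 1, i, top, stack =>
    match suffix[i]? with
    | none => none
    | some ch =>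
      if String.ofList [ch] == c then
        match stack with
        | [] => some (i + 1, top)
        | t :: rest => pmtStack suffix o c fuel (i + 1) (t ++ o.toList ++ top ++ c.toList) rest
      else if String.ofList [ch] == o then
        pmtStack suffix o c fuel (i + 1) [] (top :: stack)
      else
        pmtStack suffix o c fuel (i + 1) (top ++ [ch]) stack

def process_matching_token_alt (cur : Int) (content : String) (opening_token : String) (closing_token : String) : Int × String :=
  let suffix := PySem.List.slice content.toList (some (cur + 1)) none   -- content[cur+1:]
  match pmtStack suffix opening_token closing_token (suffix.length + 1) 0 [] [] with
  | some (i, top) => (cur + 1 + (i : Int), String.ofList top)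
  | none => (0, "")

-- ===== PRECONDITION & SPEC =====
-- +1/-1 depth contribution of one read character (both tests fire in A when the char matches both tokens)
def pvDelta (o c : String) (ch : Char) : Int :=
  (if String.ofList [ch] == o then 1 else 0) - (if String.ofList [ch] == c then 1 else 0)

def pvDeltaAt (L : List Char) (o c : String) (k : Int) : Int :=
  match PySem.List.pyGet? L k with
  | some ch => pvDelta o c ch
  | none => 0

-- Pre_ excludes (a) the inputs on which A raises IndexError (the depth count started at 1 never
-- returns to 0 before the increasing cursor leaves the string) and (b) the inputs where the cursor
-- starts negative and crosses -1 → 0 before closing, so that Python's negative-index wraparound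
-- makes A reread the string from the start — an accident of A's absolute-index loop on which B's
-- suffix-based scan raises IndexError (cites in claim.json).
-- Pre_ holds iff some prefix of reads starting at cur+1 is all in range, stays on one side of 0,
-- and its depth sum closes.
def Pre_process_matching_token (cur : Int) (content : String) (opening_token : String) (closing_token : String) : Prop :=
  ∃ t : Nat, t < 2 * content.toList.length + 2 ∧
    (∀ s : Nat, s ≤ t → (PySem.List.pyGet? content.toList (cur + 1 + (s : Int))).isSome = true) ∧
    1 + ((List.range (t + 1)).map (fun s : Nat => pvDeltaAt content.toList opening_token closing_token (cur + 1 + (s : Int)))).sum = 0 ∧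
    (0 ≤ cur + 1 ∨ cur + 1 + (t : Int) < 0)

instance (cur : Int) (content : String) (opening_token : String) (closing_token : String) : Decidable (Pre_process_matching_token cur content opening_token closing_token) := by
  unfold Pre_process_matching_token; infer_instance

def pvWitness_process_matching_token : Int × String × String × String := (0, "(ab)", "(", ")")

def Spec_process_matching_token (cur : Int) (content : String) (opening_token : String) (closing_token : String) (out : Int × String) : Prop := out = process_matching_token_alt cur content opening_token closing_token
instance (cur : Int) (content : String) (opening_token : String) (closing_token : String) (out : Int × String) : Decidable (Spec_process_matching_token cur content opening_token closing_token out) := by unfold Spec_process_matching_token; infer_instance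

-- ===== CLAIM (what is proved, stated in full; the proofs are below) =====
def Claim_equal_process_matching_token : Prop := ∀ (cur : Int) (content : String) (opening_token : String) (closing_token : String), Dom_process_matching_token cur content opening_token closing_token → Pre_process_matching_token cur content opening_token closing_token → Spec_process_matching_token cur content opening_token closing_token (process_matching_token cur content opening_token closing_token)

-- ===== LEMMAS AND PROOFS =====

theorem pmt_pyGet_bounds {xs : List Char} {i : Int} {x : Char}
    (h : PySem.List.pyGet? xs i = some x) : -(xs.length : Int) ≤ i ∧ i < (xs.length : Int) := by
  have hn : ¬ (PySem.List.pyGet? xs i = none) := by simp [h]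
  rw [PySem.List.pyGet?_eq_none_iff] at hn
  have hr : PySem.Raise.InRange xs.length i := not_not.mp hn
  unfold PySem.Raise.InRange at hr
  omega

theorem pmtLoop_exit (L : List Char) (o c : String) (f : Nat) (ident cur : Int) (res : List Char)
    (h : ¬ 0 < ident) : pmtLoop L o c (f + 1) ident cur res = some (cur, res) := by
  simp [pmtLoop, h]

theorem pmtLoop_none (L : List Char) (o c : String) (f : Nat) (ident cur : Int) (res : List Char)
    (h : 0 < ident) (hg : PySem.List.pyGet? L cur = none) :
    pmtLoop L o c (f + 1) ident cur res = none := by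
  simp [pmtLoop, h, hg]

theorem pmtLoop_step (L : List Char) (o c : String) (f : Nat) (ident cur : Int) (res : List Char) (ch : Char)
    (h : 0 < ident) (hg : PySem.List.pyGet? L cur = some ch) :
    pmtLoop L o c (f + 1) ident cur res = pmtLoop L o c f (ident + pvDelta o c ch) (cur + 1) (res ++ [ch]) := by
  simp only [pmtLoop, h, if_true, hg]
  have he : (if String.ofList [ch] == c then (if String.ofList [ch] == o then ident + 1 else ident) - 1
      else (if String.ofList [ch] == o then ident + 1 else ident)) = ident + pvDelta o c ch := by
    unfold pvDelta; split_ifs <;> ring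
  exact congrArg (fun z : Int => pmtLoop L o c f z (cur + 1) (res ++ [ch])) he

theorem loop_mono : ∀ (f : Nat) (L : List Char) (o c : String) (ident cur : Int) (res : List Char)
    (r : Int × List Char), pmtLoop L o c f ident cur res = some r →
    pmtLoop L o c (f + 1) ident cur res = some r := by
  intro f
  induction f with
  | zero => intro L o c ident cur res r h; simp [pmtLoop] at h
  | succ f ih =>
    intro L o c ident cur res r h
    by_cases hi : 0 < ident
    · cases hg : PySem.List.pyGet? L cur with
      | none => rw [pmtLoop_none L o c f ident cur res hi hg] at h; simp at h
      | some ch =>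
        rw [pmtLoop_step L o c f ident cur res ch hi hg] at h
        rw [pmtLoop_step L o c (f + 1) ident cur res ch hi hg]
        exact ih L o c _ _ _ _ h
    · rw [pmtLoop_exit L o c f ident cur res hi] at h
      rw [pmtLoop_exit L o c (f + 1) ident cur res hi]
      exact h

theorem loop_mono_ge : ∀ (k f : Nat) (L : List Char) (o c : String) (ident cur : Int) (res : List Char)
    (r : Int × List Char), pmtLoop L o c f ident cur res = some r →
    pmtLoop L o c (f + k) ident cur res = some r := by
  intro k
  induction k with
  | zero => intro f L o c ident cur res r h; exact h
  | succ k ih =>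
    intro f L o c ident cur res r h
    exact loop_mono _ _ _ _ _ _ _ _ (ih f L o c ident cur res r h)

theorem pvDelta_bounds (o c : String) (ch : Char) : -1 ≤ pvDelta o c ch ∧ pvDelta o c ch ≤ 1 := by
  unfold pvDelta; split_ifs <;> omega

-- A's flat accumulator reconstructed from B's stack state: the segments of the enclosing
-- open levels (newest first), each separated by the opening token, followed by the top segment
def pvFlat (o : String) : List Char → List (List Char) → List Char
  | top, [] => top
  | top, t :: rest => pvFlat o t rest ++ o.toList ++ top

theorem pvFlat_append (o : String) (x y : List Char) (s : List (List Char)) :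
    pvFlat o (x ++ y) s = pvFlat o x s ++ y := by
  cases s <;> simp [pvFlat]

-- the loop cursor never decreases, and strictly increases while the depth is positive
theorem loop_pos (L : List Char) (o c : String) : ∀ (f : Nat) (d j : Int) (acc : List Char)
    (j' : Int) (res : List Char), pmtLoop L o c f d j acc = some (j', res) →
    j ≤ j' ∧ (0 < d → j + 1 ≤ j') := by
  intro f
  induction f with
  | zero => intro d j acc j' res h; simp [pmtLoop] at h
  | succ f ih =>
    intro d j acc j' res h
    by_cases hd : 0 < d
    · cases hg : PySem.List.pyGet? L j with
      | none => rw [pmtLoop_none L o c f d j acc hd hg] at h; simp at h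
      | some ch =>
        rw [pmtLoop_step L o c f d j acc ch hd hg] at h
        have := ih _ _ _ _ _ h
        constructor <;> omega
    · rw [pmtLoop_exit L o c f d j acc hd] at h
      simp only [Option.some.injEq, Prod.mk.injEq] at h
      constructor
      · omega
      · intro hc; exact absurd hc hd

-- negative-side shift: a loop run that starts at a negative cursor and returns without
-- crossing 0 computes the same value started at cursor + length (Python wraparound unread)
theorem loop_shift (L : List Char) (o c : String) : ∀ (f : Nat) (d j : Int) (acc : List Char)
    (j' : Int) (res : List Char), j < 0 →
    pmtLoop L o c f d j acc = some (j', res) → j' ≤ 0 →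
    pmtLoop L o c f d (j + (L.length : Int)) acc = some (j' + (L.length : Int), res) := by
  intro f
  induction f with
  | zero => intro d j acc j' res _ h _; simp [pmtLoop] at h
  | succ f ih =>
    intro d j acc j' res hj h hj'
    by_cases hd : 0 < d
    · cases hg : PySem.List.pyGet? L j with
      | none => rw [pmtLoop_none L o c f d j acc hd hg] at h; simp at h
      | some ch =>
        have hb := pmt_pyGet_bounds hg
        have hg' : PySem.List.pyGet? L (j + (L.length : Int)) = some ch := by
          have hk : 0 < (-j).toNat ∧ ((-j).toNat : Int) = -j ∧ (-j).toNat ≤ L.length := by omega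
          have h1 : PySem.List.pyGet? L (-(((-j).toNat : Nat) : Int)) = L[L.length - (-j).toNat]? :=
            PySem.List.pyGet?_neg_natCast L (-j).toNat hk.1 hk.2.2
          rw [show (-(((-j).toNat : Nat) : Int)) = j from by omega] at h1
          have h2 : PySem.List.pyGet? L (((L.length - (-j).toNat : Nat) : Int)) = L[L.length - (-j).toNat]? :=
            PySem.List.pyGet?_natCast L (L.length - (-j).toNat)
          rw [show ((L.length - (-j).toNat : Nat) : Int) = j + (L.length : Int) from by omega] at h2
          rw [h2, ← h1, hg]
        rw [pmtLoop_step L o c f d j acc ch hd hg] at h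
        rw [pmtLoop_step L o c f d (j + (L.length : Int)) acc ch hd hg']
        by_cases hd' : 0 < d + pvDelta o c ch
        · by_cases hj1 : j + 1 < 0
          · have := ih (d + pvDelta o c ch) (j + 1) (acc ++ [ch]) j' res hj1 h hj'
            rw [show j + (L.length : Int) + 1 = j + 1 + (L.length : Int) from by ring]
            exact this
          · exfalso
            have := loop_pos L o c f (d + pvDelta o c ch) (j + 1) (acc ++ [ch]) j' res h
            have h2 := this.2 hd'
            omega
        · cases f with
          | zero => simp [pmtLoop] at h
          | succ f1 =>
            rw [pmtLoop_exit L o c f1 (d + pvDelta o c ch) (j + 1) (acc ++ [ch]) hd'] at h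
            rw [pmtLoop_exit L o c f1 (d + pvDelta o c ch) (j + (L.length : Int) + 1) (acc ++ [ch]) hd']
            simp only [Option.some.injEq, Prod.mk.injEq] at h ⊢
            exact ⟨by omega, h.2⟩
    · rw [pmtLoop_exit L o c f d j acc hd] at h
      rw [pmtLoop_exit L o c f d (j + (L.length : Int)) acc hd]
      simp only [Option.some.injEq, Prod.mk.injEq] at h ⊢
      exact ⟨by omega, h.2⟩

-- the simulation invariant: A's loop at depth stack.length+1 and cursor p+i, with accumulator
-- pvFlat of B's state, computes exactly B's stack scan (one extra fuel pays A's final exit step)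
theorem loop_stack (L : List Char) (o c : String) (hoc : o ≠ c) (p : Nat) (suffix : List Char)
    (HS : ∀ k : Nat, PySem.List.pyGet? L ((p : Int) + (k : Int)) = suffix[k]?) :
    ∀ (f i : Nat) (top : List Char) (stack : List (List Char)),
    pmtLoop L o c (f + 1) ((stack.length : Int) + 1) ((p : Int) + (i : Int)) (pvFlat o top stack)
      = (pmtStack suffix o c f i top stack).map (fun r => ((p : Int) + (r.1 : Int), r.2 ++ c.toList)) := by
  intro f
  induction f with
  | zero =>
    intro i top stack
    have hd : (0 : Int) < (stack.length : Int) + 1 := by omega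
    cases hg : suffix[i]? with
    | none =>
      rw [pmtLoop_none L o c 0 _ _ _ hd ((HS i).trans hg)]
      simp [pmtStack]
    | some ch =>
      rw [pmtLoop_step L o c 0 _ _ _ ch hd ((HS i).trans hg)]
      simp [pmtLoop, pmtStack]
  | succ f ih =>
    intro i top stack
    have hd : (0 : Int) < (stack.length : Int) + 1 := by omega
    cases hg : suffix[i]? with
    | none =>
      rw [pmtLoop_none L o c (f + 1) _ _ _ hd ((HS i).trans hg)]
      simp [pmtStack, hg]
    | some ch =>
      rw [pmtLoop_step L o c (f + 1) _ _ _ ch hd ((HS i).trans hg)]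
      have hcast : (p : Int) + (i : Int) + 1 = (p : Int) + ((i + 1 : Nat) : Int) := by push_cast; ring
      by_cases hc : (String.ofList [ch] == c) = true
      · have hcl : c.toList = [ch] := by rw [← eq_of_beq hc]; exact String.toList_ofList
        have ho : (String.ofList [ch] == o) = false := by
          rw [beq_eq_false_iff_ne]
          intro he; exact hoc ((he.symm.trans (eq_of_beq hc)).symm ▸ rfl)
        have hdel : pvDelta o c ch = -1 := by unfold pvDelta; rw [ho, hc]; norm_num
        rw [hdel]
        cases stack with
        | nil =>
          rw [show ((List.nil (α := List Char)).length : Int) + 1 + -1 = 0 from by simp]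
          rw [pmtLoop_exit L o c f 0 _ _ (by omega), hcast]
          simp [pmtStack, hg, hc, pvFlat, hcl]
        | cons t rest =>
          rw [show (((t :: rest).length : Nat) : Int) + 1 + -1 = ((rest.length : Int) + 1) from by
            simp]
          have hacc : pvFlat o top (t :: rest) ++ [ch]
              = pvFlat o (t ++ o.toList ++ top ++ c.toList) rest := by
            rw [hcl]
            simp [pvFlat, pvFlat_append]
          rw [hacc, hcast]
          rw [ih (i + 1) (t ++ o.toList ++ top ++ c.toList) rest]
          simp [pmtStack, hg, hc]
      · by_cases ho : (String.ofList [ch] == o) = true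
        · have hol : o.toList = [ch] := by rw [← eq_of_beq ho]; exact String.toList_ofList
          have hdel : pvDelta o c ch = 1 := by unfold pvDelta; simp [ho, hc]
          rw [hdel]
          have hacc : pvFlat o top stack ++ [ch] = pvFlat o [] (top :: stack) := by
            simp [pvFlat, hol]
          have hlen : ((stack.length : Int) + 1) + 1 = (((top :: stack).length : Int) + 1) := by
            simp [List.length_cons]
          rw [hacc, hcast, hlen, ih (i + 1) [] (top :: stack)]
          simp [pmtStack, hg, hc, ho]
        · have hdel : pvDelta o c ch = 0 := by unfold pvDelta; simp [ho, hc]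
          rw [hdel, add_zero]
          have hacc : pvFlat o top stack ++ [ch] = pvFlat o (top ++ [ch]) stack := by
            rw [pvFlat_append]
          rw [hacc, hcast, ih (i + 1) (top ++ [ch]) stack]
          simp [pmtStack, hg, hc, ho]

-- a successful stack scan certifies that the closing token is a single character
theorem stack_close (suffix : List Char) (o c : String) : ∀ (f i : Nat) (top : List Char)
    (stack : List (List Char)) (x : Nat × List Char),
    pmtStack suffix o c f i top stack = some x → ∃ ch : Char, c = String.ofList [ch] := by
  intro f
  induction f with
  | zero => intro i top stack x h; simp [pmtStack] at h
  | succ f ih =>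
    intro i top stack x h
    cases hg : suffix[i]? with
    | none => simp [pmtStack, hg] at h
    | some ch =>
      by_cases hc : (String.ofList [ch] == c) = true
      · exact ⟨ch, (eq_of_beq hc).symm⟩
      · by_cases ho : (String.ofList [ch] == o) = true
        · simp only [pmtStack, hg, hc, ho, if_true, if_false, Bool.false_eq_true] at h
          exact ih _ _ _ _ h
        · simp only [pmtStack, hg, hc, ho, if_false, Bool.false_eq_true] at h
          exact ih _ _ _ _ h

-- reads at nonnegative absolute positions p+k are reads of the dropped suffix
theorem hs_drop (L : List Char) (p : Nat) :
    ∀ k : Nat, PySem.List.pyGet? L ((p : Int) + (k : Int)) = (L.drop p)[k]? := by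
  intro k
  have h1 : PySem.List.pyGet? L (((p + k : Nat) : Int)) = L[p + k]? := PySem.List.pyGet?_natCast L (p + k)
  rw [show (p : Int) + (k : Int) = ((p + k : Nat) : Int) from by push_cast; ring, h1]
  rw [List.getElem?_drop]

-- Pre_'s balanced-prefix condition makes A's loop return (with fuel at least t+2), at a
-- cursor at most t+1 past the start
theorem pre_loop (t : Nat) :
    ∀ (L : List Char) (o c : String) (j : Int) (d : Int), 0 ≤ d → ∀ (acc : List Char),
      (∀ s : Nat, s ≤ t → (PySem.List.pyGet? L (j + (s : Int))).isSome = true) →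
      (d + 1) + ((List.range (t + 1)).map (fun s : Nat => pvDeltaAt L o c (j + (s : Int)))).sum = 0 →
      ∀ f : Nat, t + 2 ≤ f → ∃ r : Int × List Char,
        pmtLoop L o c f (d + 1) j acc = some r ∧ r.1 ≤ j + (t : Int) + 1 := by
  induction t with
  | zero =>
    intro L o c j d hd acc hv hs f hf
    have hv0 := hv 0 (Nat.le_refl 0)
    rw [show j + ((0 : Nat) : Int) = j from by omega] at hv0
    obtain ⟨ch, hch⟩ := Option.isSome_iff_exists.mp hv0
    have hda : pvDeltaAt L o c j = pvDelta o c ch := by unfold pvDeltaAt; rw [hch]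
    have hsum : (d + 1) + pvDelta o c ch = 0 := by
      simp only [Nat.zero_add, List.range_one, List.map_cons, List.map_nil, List.sum_cons,
        List.sum_nil, add_zero, Nat.cast_zero] at hs
      rw [hda] at hs
      exact hs
    obtain ⟨f1, rfl⟩ : ∃ f1, f = f1 + 1 + 1 := ⟨f - 2, by omega⟩
    refine ⟨(j + 1, acc ++ [ch]), ?_, by simp⟩
    rw [pmtLoop_step L o c (f1 + 1) (d + 1) j acc ch (by omega) hch, hsum]
    exact pmtLoop_exit L o c f1 0 (j + 1) (acc ++ [ch]) (by omega)
  | succ t ih =>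
    intro L o c j d hd acc hv hs f hf
    have hv0 := hv 0 (Nat.zero_le _)
    rw [show j + ((0 : Nat) : Int) = j from by omega] at hv0
    obtain ⟨ch, hch⟩ := Option.isSome_iff_exists.mp hv0
    have hda : pvDeltaAt L o c j = pvDelta o c ch := by unfold pvDeltaAt; rw [hch]
    obtain ⟨f1, rfl⟩ : ∃ f1, f = f1 + 1 := ⟨f - 1, by omega⟩
    have hstep := pmtLoop_step L o c f1 (d + 1) j acc ch (by omega) hch
    have hsum : ((List.range (t + 1 + 1)).map (fun s : Nat => pvDeltaAt L o c (j + (s : Int)))).sum =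
        pvDeltaAt L o c j +
        ((List.range (t + 1)).map (fun s : Nat => pvDeltaAt L o c ((j + 1) + (s : Int)))).sum := by
      rw [List.range_succ_eq_map]
      simp only [List.map_cons, List.sum_cons, Nat.cast_zero, add_zero, List.map_map]
      congr 1
      congr 1
      apply List.map_congr_left
      intro s _
      simp only [Function.comp_apply]
      congr 1
      omega
    by_cases hz : d + 1 + pvDelta o c ch = 0
    · obtain ⟨f2, rfl⟩ : ∃ f2, f1 = f2 + 1 := ⟨f1 - 1, by omega⟩
      refine ⟨(j + 1, acc ++ [ch]), ?_, by simp; omega⟩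
      rw [pmtLoop_step L o c (f2 + 1) (d + 1) j acc ch (by omega) hch, hz]
      exact pmtLoop_exit L o c f2 0 (j + 1) (acc ++ [ch]) (by omega)
    · have hbd := pvDelta_bounds o c ch
      have hd' : 0 ≤ d + pvDelta o c ch := by omega
      have hv' : ∀ s : Nat, s ≤ t → (PySem.List.pyGet? L ((j + 1) + (s : Int))).isSome = true := by
        intro s hsle
        have hvv := hv (s + 1) (by omega)
        rw [show j + ((s + 1 : Nat) : Int) = (j + 1) + (s : Int) from by push_cast; ring] at hvv
        exact hvv
      have hs' : ((d + pvDelta o c ch) + 1) +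
          ((List.range (t + 1)).map (fun s : Nat => pvDeltaAt L o c ((j + 1) + (s : Int)))).sum = 0 := by
        rw [hsum, hda] at hs
        omega
      obtain ⟨r, hr, hrb⟩ := ih L o c (j + 1) (d + pvDelta o c ch) hd' (acc ++ [ch]) hv' hs' f1 (by omega)
      refine ⟨r, ?_, by push_cast at hrb ⊢; omega⟩
      rw [hstep, show d + 1 + pvDelta o c ch = (d + pvDelta o c ch) + 1 from by ring]
      exact hr

-- ===== VERDICT (by name: the statement is the Claim_ definition above) =====
theorem process_matching_token_spec : Claim_equal_process_matching_token := by
  intro cur content o c _ hpre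
  unfold Spec_process_matching_token
  obtain ⟨t, ht, hv, hs, hside⟩ := hpre
  -- A never returns when the two tokens coincide: every depth delta is 0
  have hoc : o ≠ c := by
    intro he
    subst he
    have hz : ∀ s : Nat, pvDeltaAt content.toList o o (cur + 1 + (s : Int)) = 0 := by
      intro s
      unfold pvDeltaAt pvDelta
      cases PySem.List.pyGet? content.toList (cur + 1 + (s : Int)) with
      | none => rfl
      | some ch => simp
    have hz' : (List.range (t + 1)).map (fun s : Nat => pvDeltaAt content.toList o o (cur + 1 + (s : Int))) =
        (List.range (t + 1)).map (fun _ : Nat => (0 : Int)) :=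
      List.map_congr_left (fun s _ => hz s)
    rw [hz'] at hs
    simp at hs
  -- first and last reads are in range
  have hv0 := hv 0 (Nat.zero_le t)
  rw [show cur + 1 + ((0 : Nat) : Int) = cur + 1 from by omega] at hv0
  obtain ⟨ch0, hch0⟩ := Option.isSome_iff_exists.mp hv0
  have hb0 := pmt_pyGet_bounds hch0
  obtain ⟨cht, hcht⟩ := Option.isSome_iff_exists.mp (hv t (Nat.le_refl t))
  have hbt := pmt_pyGet_bounds hcht
  -- A's loop returns within fuel t+2, at a cursor at most cur+t+2
  have hs0 : ((0 : Int) + 1) + ((List.range (t + 1)).map (fun s : Nat => pvDeltaAt content.toList o c (cur + 1 + (s : Int)))).sum = 0 := by omega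
  obtain ⟨⟨r1, r2⟩, hr, hrb⟩ := pre_loop t content.toList o c (cur + 1) 0 le_rfl [] hv hs0 (t + 2) le_rfl
  rw [show (0 : Int) + 1 = 1 from by ring] at hr
  simp only at hrb
  -- the start of B's suffix as an absolute nonnegative position p, by wraparound side
  obtain ⟨p, hpI, hsuf, ht2, hrp⟩ :
      ∃ p : Nat, ((p : Int) = cur + 1 ∨ (p : Int) = (content.toList.length : Int) + (cur + 1)) ∧
        PySem.List.slice content.toList (some (cur + 1)) none = content.toList.drop p ∧
        t < content.toList.length - p ∧
        pmtLoop content.toList o c (t + 2) 1 (p : Int) [] = some (r1 + ((p : Int) - (cur + 1)), r2) := by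
    by_cases hca : 0 ≤ cur + 1
    · refine ⟨(cur + 1).toNat, Or.inl (by omega), ?_, by omega, ?_⟩
      · rw [show cur + 1 = (((cur + 1).toNat : Nat) : Int) from by omega]
        exact PySem.List.slice_from_natCast content.toList (cur + 1).toNat
      · rw [show (((cur + 1).toNat : Nat) : Int) = cur + 1 from by omega]
        rw [show r1 + (cur + 1 - (cur + 1)) = r1 from by ring]
        exact hr
    · have hcrs : cur + 1 + (t : Int) < 0 := by rcases hside with h | h <;> omega
      refine ⟨((content.toList.length : Int) + (cur + 1)).toNat, Or.inr (by omega), ?_, by omega, ?_⟩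
      · have hk1 : 0 < (-(cur + 1)).toNat := by omega
        have hk2 : (-(cur + 1)).toNat ≤ content.toList.length := by omega
        have := PySem.List.slice_from_neg_natCast content.toList (-(cur + 1)).toNat hk1
        rw [show (-(((-(cur + 1)).toNat : Nat) : Int)) = cur + 1 from by omega] at this
        rw [this]
        congr 1
        omega
      · have hsh := loop_shift content.toList o c (t + 2) 1 (cur + 1) [] r1 r2 (by omega) hr (by omega)
        rw [show cur + 1 + (content.toList.length : Int) = ((((content.toList.length : Int) + (cur + 1)).toNat : Nat) : Int) from by omega] at hsh
        rw [hsh]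
        congr 2
        omega
  -- run the simulation invariant at p with B's exact fuel
  have hinv := loop_stack content.toList o c hoc p (content.toList.drop p)
    (hs_drop content.toList p) ((content.toList.drop p).length + 1) 0 [] []
  simp only [List.length_nil, Nat.cast_zero, zero_add, add_zero, pvFlat] at hinv
  have hlend : (content.toList.drop p).length = content.toList.length - p := List.length_drop
  -- A's loop at B's fuel: lift the fuel-(t+2) run
  have hrBig : pmtLoop content.toList o c ((content.toList.drop p).length + 1 + 1) 1 (p : Int) []
      = some (r1 + ((p : Int) - (cur + 1)), r2) := by
    have := loop_mono_ge ((content.toList.drop p).length - t) (t + 2) content.toList o c 1 (p : Int) [] _ hrp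
    rw [show (t + 2) + ((content.toList.drop p).length - t) = (content.toList.drop p).length + 1 + 1 from by omega] at this
    exact this
  rw [hrBig] at hinv
  -- hence B's stack scan succeeds, and its value determines r
  cases hst : pmtStack (content.toList.drop p) o c ((content.toList.drop p).length + 1) 0 [] [] with
  | none => rw [hst] at hinv; simp at hinv
  | some pr =>
    obtain ⟨i', top'⟩ := pr
    rw [hst] at hinv
    simp only [Option.map_some, Option.some.injEq, Prod.mk.injEq] at hinv
    obtain ⟨hcur, hres⟩ := hinv
    obtain ⟨chc, hchc⟩ := stack_close (content.toList.drop p) o c _ _ _ _ _ hst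
    have hct : c.toList = [chc] := by rw [hchc]; exact String.toList_ofList
    -- A's port runs at fuel 2*len+2 ≥ t+2 and returns the same value
    have hrA : pmtLoop content.toList o c (2 * content.toList.length + 2) 1 (cur + 1) []
        = some (r1, r2) := by
      have := loop_mono_ge (2 * content.toList.length - t) (t + 2) content.toList o c 1 (cur + 1) [] _ hr
      rw [show (t + 2) + (2 * content.toList.length - t) = 2 * content.toList.length + 2 from by omega] at this
      exact this
    unfold process_matching_token process_matching_token_alt
    simp only [hsuf, hst, hrA]
    rw [hres, hct]
    simp only [List.dropLast_concat]
    rw [Prod.mk.injEq]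
    exact ⟨by omega, rfl⟩
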